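-- pv_equiv track=rewrite | github.com/dragon1ce/SoftUniTaskRepo | Soft_uni_fundamentals/7_Text_processing/Exercise/10_winning_ticket.py | check_consecutive_count
-- ===== SOURCE A (Python) =====
-- def check_consecutive_count(string: str, sym: str) -> int:
--     num_list = []
--     count = 0
--     for char in string:
--         if char == sym:
--             count += 1
--         elif char != sym:
--             num_list.append(count)
--             count = 0
--     else:
--         num_list.append(count)
--     return max(num_list)
-- ===== SOURCE B (Python) =====
-- def check_consecutive_count(string: str, sym: str) -> int:
--     # run-based scan: jump over each maximal run of equal characters,
--     # keep the best length of runs whose character matches sym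
--     best = 0
--     n = len(string)
--     i = 0
--     while i < n:
--         j = i + 1
--         while j < n and string[j] == string[i]:
--             j += 1
--         if string[i] == sym:
--             best = max(best, j - i)
--         i = j
--     return best
-- ===== Notes on version B (the rewrite author's own statement) =====
-- stated objective: alternative
-- what changed: B scans the string run by run with two index pointers and a running best, instead of A's per-character counter that appends boundary counts to a list and takes max at the end.
import Mathlib
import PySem

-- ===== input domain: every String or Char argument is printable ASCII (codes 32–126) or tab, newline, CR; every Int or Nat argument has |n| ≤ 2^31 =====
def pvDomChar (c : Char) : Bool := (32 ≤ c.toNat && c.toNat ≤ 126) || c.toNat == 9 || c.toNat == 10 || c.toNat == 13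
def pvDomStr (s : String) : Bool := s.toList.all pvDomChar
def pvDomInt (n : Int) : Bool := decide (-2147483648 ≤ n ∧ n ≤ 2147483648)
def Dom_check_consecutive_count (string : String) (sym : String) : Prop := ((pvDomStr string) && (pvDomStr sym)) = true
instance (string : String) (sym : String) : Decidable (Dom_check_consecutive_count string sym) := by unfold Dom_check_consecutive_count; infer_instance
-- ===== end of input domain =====

-- B replaces A's per-character counter + boundary list + final max by a run-by-run scan
-- keeping only the best run length so far (alternative decomposition, same O(n) cost).

-- ===== PORT A =====
-- one loop step: 'if char == sym: count += 1 else: num_list.append(count); count = 0'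
def aStep (sym : String) (st : List Int × Int) (c : Char) : List Int × Int :=
  if sym.toList = [c] then (st.1, st.2 + 1) else (st.1 ++ [st.2], 0)

def check_consecutive_count (string : String) (sym : String) : Int :=
  let st := string.toList.foldl (aStep sym) ([], 0)
  let numList := st.1 ++ [st.2]
  -- Python max(num_list); num_list is never empty here, the getD default is unreachable
  (PySem.List.max? numList (fun y => y)).getD 0

-- ===== PORT B =====
-- Source B's outer while loop over runs: each step consumes one maximal run of equal
-- characters (the inner 'while j < n and string[j] == string[i]' = takeWhile/dropWhile)
-- and updates the best length when the run's character equals sym.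
def altLoop (sym : String) : List Char → Int → Int
  | [], best => best
  | c :: tl, best =>
    let k : Int := 1 + (tl.takeWhile (fun x => x == c)).length
    altLoop sym (tl.dropWhile (fun x => x == c))
      (if sym.toList = [c] then max best k else best)
termination_by l _ => l.length
decreasing_by
  exact Nat.lt_succ_of_le (List.length_dropWhile_le _ _)

def check_consecutive_count_alt (string : String) (sym : String) : Int :=
  altLoop sym string.toList 0

-- ===== PRECONDITION & SPEC =====
def Spec_check_consecutive_count (string : String) (sym : String) (out : Int) : Prop := out = check_consecutive_count_alt string sym
instance (string : String) (sym : String) (out : Int) : Decidable (Spec_check_consecutive_count string sym out) := by unfold Spec_check_consecutive_count; infer_instance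

-- ===== CLAIM (what is proved, stated in full; the proofs are below) =====
def Claim_equal_check_consecutive_count : Prop := ∀ (string : String) (sym : String), Dom_check_consecutive_count string sym → Spec_check_consecutive_count string sym (check_consecutive_count string sym)

-- ===== LEMMAS AND PROOFS =====

-- functional core of A's loop: (completed counts, running count)
def gAcc (sym : String) : List Char → Int → List Int × Int
  | [], n => ([], n)
  | c :: tl, n =>
    if sym.toList = [c] then gAcc sym tl (n + 1)
    else (n :: (gAcc sym tl 0).1, (gAcc sym tl 0).2)

-- reference function: max run of sym, with a pending current-run count
def mRun (sym : String) : List Char → Int → Int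
  | [], cur => cur
  | c :: tl, cur =>
    if sym.toList = [c] then mRun sym tl (cur + 1)
    else max cur (mRun sym tl 0)

-- Python max of a nonempty list as a fold
def listMax : List Int → Int
  | [] => 0
  | x :: t => t.foldl max x

theorem foldl_max_shift (t : List Int) (a b : Int) :
    t.foldl max (max a b) = max a (t.foldl max b) := by
  induction t generalizing b with
  | nil => rfl
  | cons c t ih =>
    simp only [List.foldl_cons]
    rw [max_assoc, ih]

theorem listMax_cons (a : Int) (x : Int) (t : List Int) :
    listMax (a :: x :: t) = max a (listMax (x :: t)) := by
  simp only [listMax, List.foldl_cons]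
  exact foldl_max_shift t a x

theorem fold_eq_gAcc (sym : String) (l : List Char) (nl : List Int) (cnt : Int) :
    l.foldl (aStep sym) (nl, cnt) = (nl ++ (gAcc sym l cnt).1, (gAcc sym l cnt).2) := by
  induction l generalizing nl cnt with
  | nil => simp [gAcc]
  | cons c tl ih =>
    simp only [List.foldl_cons, aStep, gAcc]
    split_ifs with h
    · exact ih nl (cnt + 1)
    · rw [ih (nl ++ [cnt]) 0]; simp

theorem listMax_gAcc (sym : String) (l : List Char) (cur : Int) :
    listMax ((gAcc sym l cur).1 ++ [(gAcc sym l cur).2]) = mRun sym l cur := by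
  induction l generalizing cur with
  | nil => simp [gAcc, mRun, listMax]
  | cons c tl ih =>
    simp only [gAcc, mRun]
    split_ifs with h
    · exact ih (cur + 1)
    · simp only [List.cons_append]
      rw [← ih 0]
      rcases hg : (gAcc sym tl 0).1 ++ [(gAcc sym tl 0).2] with _ | ⟨x, t⟩
      · simp at hg
      · exact listMax_cons cur x t

theorem mRun_nonneg (sym : String) (l : List Char) (cur : Int) (h : 0 ≤ cur) :
    0 ≤ mRun sym l cur := by
  induction l generalizing cur with
  | nil => exact h
  | cons c tl ih =>
    simp only [mRun]
    split_ifs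
    · exact ih _ (by omega)
    · exact le_trans h (le_max_left _ _)

theorem mRun_run_match (sym : String) (c : Char) (t r : List Char) (cur : Int)
    (hall : ∀ x ∈ t, x = c) (hm : sym.toList = [c]) :
    mRun sym (t ++ r) cur = mRun sym r (cur + t.length) := by
  induction t generalizing cur with
  | nil => simp
  | cons y t ih =>
    have hy : y = c := hall y (by simp)
    subst hy
    simp only [List.cons_append, mRun, if_pos hm]
    rw [ih (cur + 1) (fun x hx => hall x (by simp [hx]))]
    congr 1
    simp only [List.length_cons]
    push_cast
    ring

theorem mRun_run_nomatch (sym : String) (c : Char) (t r : List Char)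
    (hall : ∀ x ∈ t, x = c) (hm : sym.toList ≠ [c]) :
    mRun sym (t ++ r) 0 = mRun sym r 0 := by
  induction t with
  | nil => simp
  | cons y t ih =>
    have hy : y = c := hall y (by simp)
    subst hy
    simp only [List.cons_append, mRun, if_neg hm]
    rw [ih (fun x hx => hall x (by simp [hx]))]
    exact max_eq_right (mRun_nonneg _ _ _ le_rfl)

theorem mRun_drop_shift (sym : String) (c : Char) (r : List Char) (k : Int)
    (hk : 0 ≤ k) (hr : ∀ d ∈ r.head?, (d == c) = false) (hm : sym.toList = [c]) :
    mRun sym r k = max k (mRun sym r 0) := by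
  cases r with
  | nil => simp [mRun, max_eq_left hk]
  | cons d r' =>
    have hd : (d == c) = false := hr d rfl
    have hdm : sym.toList ≠ [d] := by
      rw [hm]
      intro h
      have : c = d := by injection h
      simp [this] at hd
    simp only [mRun, if_neg hdm]
    rw [max_eq_right (mRun_nonneg _ _ _ le_rfl)]

theorem altLoop_eq (sym : String) (n : Nat) :
    ∀ (l : List Char) (best : Int), l.length ≤ n → 0 ≤ best →
      altLoop sym l best = max best (mRun sym l 0) := by
  induction n with
  | zero =>
    intro l best hl hb
    have : l = [] := by cases l <;> simp_all
    subst this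
    simp [altLoop, mRun, max_eq_left hb]
  | succ n ih =>
    intro l best hl hb
    cases l with
    | nil => simp [altLoop, mRun, max_eq_left hb]
    | cons c tl =>
      have hsplit : tl.takeWhile (fun x => x == c) ++ tl.dropWhile (fun x => x == c) = tl :=
        List.takeWhile_append_dropWhile
      have hall : ∀ x ∈ tl.takeWhile (fun x => x == c), x = c := fun x hx => by
        have := List.mem_takeWhile_imp hx
        exact eq_of_beq this
      have hlen : (tl.dropWhile (fun x => x == c)).length ≤ n := by
        have := List.length_dropWhile_le (fun x => x == c) tl
        simp at hl
        omega
      have hhead : ∀ d ∈ (tl.dropWhile (fun x => x == c)).head?, (d == c) = false := by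
        intro d hd
        have := List.head?_dropWhile_not (fun x => x == c) tl
        rw [hd] at this
        simpa using this
      have hall' : ∀ x ∈ c :: tl.takeWhile (fun x => x == c), x = c := by
        intro x hx
        rcases List.mem_cons.mp hx with h1 | h1
        · exact h1
        · exact hall x h1
      have h1 : c :: tl = (c :: tl.takeWhile (fun x => x == c)) ++ tl.dropWhile (fun x => x == c) := by
        conv_lhs => rw [← hsplit]
        simp
      rw [altLoop]
      split_ifs with h
      · -- run of sym: whole run (length k) matches
        have hk : (0:Int) ≤ 1 + (tl.takeWhile (fun x => x == c)).length := by positivity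
        rw [ih _ _ hlen (le_trans hb (le_max_left _ _))]
        have hrun : mRun sym (c :: tl) 0 = mRun sym (tl.dropWhile (fun x => x == c))
            (1 + (tl.takeWhile (fun x => x == c)).length) := by
          rw [h1, mRun_run_match sym c _ _ 0 hall' h]
          congr 1
          simp
          ring
        rw [hrun, mRun_drop_shift sym c _ _ hk hhead h, ← max_assoc]
      · -- run of a non-sym character: contributes nothing
        have hnm : mRun sym (c :: tl) 0 = mRun sym (tl.dropWhile (fun x => x == c)) 0 := by
          rw [h1, mRun_run_nomatch sym c _ _ hall' h]
        rw [ih _ _ hlen hb, hnm]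

theorem max?_append_singleton (l : List Int) (e : Int) :
    (PySem.List.max? (l ++ [e]) (fun y => y)).getD 0 = listMax (l ++ [e]) := by
  rcases hl : l ++ [e] with _ | ⟨x, t⟩
  · simp at hl
  · rw [PySem.List.max?_id_cons]
    rfl

-- ===== VERDICT (by name: the statement is the Claim_ definition above) =====
theorem check_consecutive_count_spec : Claim_equal_check_consecutive_count := by
  intro string sym _
  unfold Spec_check_consecutive_count check_consecutive_count check_consecutive_count_alt
  rw [fold_eq_gAcc sym string.toList [] 0]
  simp only [List.nil_append]
  rw [max?_append_singleton, listMax_gAcc]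
  rw [altLoop_eq sym string.toList.length string.toList 0 le_rfl le_rfl]
  simp [mRun_nonneg sym string.toList 0 le_rfl]
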